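-- pv_equiv track=rewrite | github.com/S0jer/algorithms-and-data-structures-course-2022 | Egz_kol/Egz_2021/egzamin_1_szablony/zad1.py | chaos_index
-- ===== SOURCE A (Python) =====
-- def chaos_index(T):
--     n = len(T)
--
--     for i in range(n):
--         T[i] = (T[i], i)
--
--     mergeSort(T, 0, n)
--
--     result = -1
--     for i in range(n):
--         if abs(T[i][1] - i) > result:
--             result = abs(T[i][1] - i)
--
--     return result
--
-- def mergeSort(T, l, r):
--     if r - l >= 2:
--         mid = (l + r) // 2
--         mergeSort(T, l, mid)
--         mergeSort(T, mid, r)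
--         merge(T, l, mid, r)
--     return T
--
-- def merge(T, l, mid, r):
--     result = []
--     idxL, idxR = l, mid
--
--     while idxL < mid and idxR < r:
--         if T[idxL][0] <= T[idxR][0]:
--             result.append(T[idxL])
--             idxL += 1
--         else:
--             result.append(T[idxR])
--             idxR += 1
--
--     if idxL == mid:
--         result += T[idxR:r]
--     else:
--         result += T[idxL:mid]
--     T[l:r] = result
--
--     return T
-- ===== SOURCE B (Python) =====
-- def chaos_index(T):
--     # Sorting-free: the stable sorted position of the element at index i is
--     # (# elements strictly smaller) + (# equal elements with smaller index).
--     best = -1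
--     for i, v in enumerate(T):
--         rank = 0
--         for j, w in enumerate(T):
--             if w < v or (w == v and j < i):
--                 rank += 1
--         if abs(rank - i) > best:
--             best = abs(rank - i)
--     return best
-- ===== Notes on version B (the rewrite author's own statement) =====
-- stated objective: alternative
-- what changed: B computes each element's stable sorted position directly by counting (strictly smaller elements) + (equal elements with smaller index) in nested loops, eliminating A's mergesort (and any sorting) entirely.
import Mathlib
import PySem

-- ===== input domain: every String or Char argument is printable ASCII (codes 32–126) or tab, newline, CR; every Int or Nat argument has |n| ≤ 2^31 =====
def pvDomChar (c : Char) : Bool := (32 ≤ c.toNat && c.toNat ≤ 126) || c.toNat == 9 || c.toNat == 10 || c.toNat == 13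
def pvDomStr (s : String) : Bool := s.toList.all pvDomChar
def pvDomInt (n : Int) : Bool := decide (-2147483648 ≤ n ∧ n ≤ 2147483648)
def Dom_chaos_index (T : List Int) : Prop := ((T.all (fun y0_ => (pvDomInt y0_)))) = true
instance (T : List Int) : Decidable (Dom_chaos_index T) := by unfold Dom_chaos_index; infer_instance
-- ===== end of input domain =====

-- B avoids sorting entirely: the stable sorted position of the element at index i equals
-- (# strictly smaller elements) + (# equal elements with smaller index), computed by nested
-- counting loops (alternative algorithm, O(n^2) vs A's O(n log n)).  A mutates its argument
-- in place (B does not); the equivalence proved here is about the RETURN value only.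

-- ===== PORT A =====
-- A's merge works in place on the segment T[l:r] split at mid; on disjoint segments this is
-- exactly the functional two-list merge below (the while loop, then one of the two tail appends).
def mergeP : List (Int × Int) → List (Int × Int) → List (Int × Int)
  | [], ys => ys
  | x :: xs, [] => x :: xs
  | x :: xs, y :: ys =>
    if x.1 ≤ y.1 then x :: mergeP xs (y :: ys) else y :: mergeP (x :: xs) ys

-- A's mergeSort(T, l, r) recurses on the segment [l, r) split at mid = (l+r)//2, i.e. the
-- segment's first ⌊length/2⌋ elements; on the segment as a list that is take/drop at length/2.
def mergeSortP (zs : List (Int × Int)) : List (Int × Int) :=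
  if h : 2 ≤ zs.length then
    mergeP (mergeSortP (zs.take (zs.length / 2))) (mergeSortP (zs.drop (zs.length / 2)))
  else zs
termination_by zs.length
decreasing_by
  · simp only [List.length_take]; omega
  · simp only [List.length_drop]; omega

def chaos_index (T : List Int) : Int :=
  -- for i in range(n): T[i] = (T[i], i)
  let ps : List (Int × Int) := (PySem.List.enumerate T).map (fun p => (p.2, p.1))
  let s := mergeSortP ps
  -- result = -1; for i in range(n): if abs(T[i][1] - i) > result: result = abs(T[i][1] - i)
  (PySem.List.enumerate s).foldl
    (fun res p => if |p.2.2 - p.1| > res then |p.2.2 - p.1| else res) (-1)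

-- ===== PORT B =====
def chaos_index_alt (T : List Int) : Int :=
  (PySem.List.enumerate T).foldl (fun best p =>
    -- rank = 0; for j, w in enumerate(T): if w < v or (w == v and j < i): rank += 1
    let rank : Int := (PySem.List.enumerate T).foldl
      (fun r q => if q.2 < p.2 ∨ (q.2 = p.2 ∧ q.1 < p.1) then r + 1 else r) 0
    if |rank - p.1| > best then |rank - p.1| else best) (-1)

-- ===== PRECONDITION & SPEC =====
def Spec_chaos_index (T : List Int) (out : Int) : Prop := out = chaos_index_alt T
instance (T : List Int) (out : Int) : Decidable (Spec_chaos_index T out) := by unfold Spec_chaos_index; infer_instance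

-- ===== CLAIM (what is proved, stated in full; the proofs are below) =====
def Claim_equal_chaos_index : Prop := ∀ (T : List Int), Dom_chaos_index T → Spec_chaos_index T (chaos_index T)

-- ===== LEMMAS AND PROOFS =====

-- Strict lexicographic order on the (value, index) pairs; A's stable mergesort orders the
-- pairs strictly by it, and B counts exactly its predecessors.
abbrev Lt2 (p q : Int × Int) : Prop := p.1 < q.1 ∨ (p.1 = q.1 ∧ p.2 < q.2)

-- Boolean form of Lt2, kept as a frozen def so simp does not re-normalise the predicate.
def lt2b (p q : Int × Int) : Bool := p.1 < q.1 || (p.1 == q.1 && p.2 < q.2)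

lemma lt2b_eq_true_iff (p q : Int × Int) : lt2b p q = true ↔ Lt2 p q := by
  simp [lt2b, Lt2]

-- B's rank of a pair r: how many pairs of ps precede r lexicographically.
def rankIn (ps : List (Int × Int)) (r : Int × Int) : Int :=
  (ps.countP (fun q => lt2b q r) : Int)

lemma lt2_asymm {a b : Int × Int} (h : Lt2 a b) : ¬ Lt2 b a := by
  rcases h with h | ⟨h1, h2⟩ <;> (intro hc; rcases hc with hc | ⟨hc1, hc2⟩ <;> omega)

lemma mergeP_perm : ∀ xs ys : List (Int × Int), (mergeP xs ys).Perm (xs ++ ys) := by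
  intro xs ys
  fun_induction mergeP xs ys with
  | case1 ys => simp
  | case2 x xs => simp
  | case3 x xs y ys h ih => simpa using ih.cons x
  | case4 x xs y ys h ih =>
    exact (ih.cons y).trans List.perm_middle.symm

lemma mergeP_pairwise : ∀ xs ys : List (Int × Int),
    xs.Pairwise Lt2 → ys.Pairwise Lt2 →
    (∀ x ∈ xs, ∀ y ∈ ys, x.2 < y.2) → (mergeP xs ys).Pairwise Lt2 := by
  intro xs ys
  fun_induction mergeP xs ys with
  | case1 ys => intro _ h _; exact h
  | case2 x xs => intro h _ _; exact h
  | case3 x xs y ys h ih =>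
    intro hx hy hc
    rw [List.pairwise_cons] at hx
    refine List.pairwise_cons.2 ⟨?_, ih hx.2 hy (fun a ha b hb => hc a (by simp [ha]) b hb)⟩
    intro z hz
    rcases (List.Perm.mem_iff (mergeP_perm xs (y :: ys))).1 hz with hz'
    rcases List.mem_append.1 hz' with hzl | hzr
    · exact hx.1 z hzl
    · have hz1 : y.1 ≤ z.1 := by
        rcases List.mem_cons.mp hzr with hzy | hzys
        · simp [hzy]
        · rcases (List.pairwise_cons.1 hy).1 z hzys with h1 | ⟨h1, _⟩ <;> omega
      have h2 : x.2 < z.2 := hc x (by simp) z hzr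
      rcases lt_or_eq_of_le (le_trans h hz1) with h1 | h1
      · exact Or.inl h1
      · exact Or.inr ⟨h1, h2⟩
  | case4 x xs y ys h ih =>
    intro hx hy hc
    rw [List.pairwise_cons] at hy
    refine List.pairwise_cons.2 ⟨?_, ih hx hy.2 (fun a ha b hb => hc a ha b (by simp [hb]))⟩
    intro z hz
    have hyx : y.1 < x.1 := lt_of_not_ge h
    rcases (List.Perm.mem_iff (mergeP_perm (x :: xs) ys)).1 hz with hz'
    rcases List.mem_append.1 hz' with hzl | hzr
    · have hz1 : x.1 ≤ z.1 := by
        rcases List.mem_cons.mp hzl with hzx | hzxs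
        · simp [hzx]
        · rcases (List.pairwise_cons.1 hx).1 z hzxs with h1 | ⟨h1, _⟩ <;> omega
      exact Or.inl (lt_of_lt_of_le hyx hz1)
    · exact hy.1 z hzr

lemma mergeSortP_perm : ∀ zs : List (Int × Int), (mergeSortP zs).Perm zs := by
  intro zs
  fun_induction mergeSortP zs with
  | case1 zs h ih1 ih2 =>
    exact (mergeP_perm _ _).trans <| (ih1.append ih2).trans <| by
      rw [List.take_append_drop]
  | case2 zs h => exact List.Perm.refl zs

lemma mergeSortP_pairwise : ∀ zs : List (Int × Int),
    zs.Pairwise (fun p q => p.2 < q.2) → (mergeSortP zs).Pairwise Lt2 := by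
  intro zs
  fun_induction mergeSortP zs with
  | case1 zs h ih1 ih2 =>
    intro hp
    have hsplit : zs = zs.take (zs.length / 2) ++ zs.drop (zs.length / 2) :=
      (List.take_append_drop _ zs).symm
    have hcross : ∀ a ∈ zs.take (zs.length / 2), ∀ b ∈ zs.drop (zs.length / 2), a.2 < b.2 := by
      have := List.pairwise_append.1 (hsplit ▸ hp)
      exact this.2.2
    refine mergeP_pairwise _ _
      (ih1 (hp.sublist (List.take_sublist _ _)))
      (ih2 (hp.sublist (List.drop_sublist _ _))) ?_
    intro a ha b hb
    exact hcross a ((mergeSortP_perm _).mem_iff.1 ha) b ((mergeSortP_perm _).mem_iff.1 hb)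
  | case2 zs h =>
    intro _
    rcases zs with _ | ⟨a, _ | ⟨b, t⟩⟩
    · exact List.Pairwise.nil
    · simp
    · exact absurd (by simp) h

lemma pairs_pairwise_snd (T : List Int) :
    ((PySem.List.enumerate T).map (fun p => (p.2, p.1))).Pairwise
      (fun p q : Int × Int => p.2 < q.2) := by
  rw [List.pairwise_map]
  exact PySem.List.pairwise_lt_enumerate T 0

-- In a strictly Lt2-sorted list, the number of Lt2-predecessors of s[k] is exactly k.
lemma countP_pos : ∀ (s : List (Int × Int)), s.Pairwise Lt2 →
    ∀ (k : Nat) (h : k < s.length), s.countP (fun q => lt2b q s[k]) = k := by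
  intro s
  induction s with
  | nil => intro _ k h; simp at h
  | cons x t ih =>
    intro hp k h
    rcases List.pairwise_cons.1 hp with ⟨hx, ht⟩
    cases k with
    | zero =>
      simp only [List.getElem_cons_zero]
      have h1 : t.countP (fun q => lt2b q x) = 0 := by
        rw [List.countP_eq_zero]
        intro q hq
        simp only [lt2b_eq_true_iff]
        exact lt2_asymm (hx q hq)
      have h2 : lt2b x x = false := by simp [lt2b]
      rw [List.countP_cons, h1, h2]
      rfl
    | succ k =>
      have hk : k < t.length := by simpa using h
      have hmem : t[k] ∈ t := List.getElem_mem hk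
      have h1 : lt2b x t[k] = true := (lt2b_eq_true_iff _ _).2 (hx _ hmem)
      simp only [List.getElem_cons_succ]
      rw [List.countP_cons, ih ht k hk, h1]
      rfl

lemma if_gt_eq_max (r x : Int) : (if x > r then x else r) = max r x := by
  rcases le_total x r with h | h
  · rw [if_neg (not_lt.2 h), max_eq_left h]
  · rcases lt_or_eq_of_le h with h' | h'
    · rw [if_pos h', max_eq_right h]
    · simp [h', max_self]

-- A's running-max loop over the sorted list, as a foldl max over per-position displacements,
-- rewritten through countP_pos into the rank-based per-element displacements.
lemma a_as_foldl_max (T : List Int) :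
    chaos_index T =
      ((mergeSortP ((PySem.List.enumerate T).map (fun p => (p.2, p.1)))).map
        (fun r => |r.2 - rankIn (mergeSortP ((PySem.List.enumerate T).map (fun p => (p.2, p.1)))) r|)).foldl
        max (-1) := by
  simp only [chaos_index]
  set s := mergeSortP ((PySem.List.enumerate T).map (fun p => (p.2, p.1))) with hs
  rw [PySem.List.foldl_congr_mem (PySem.List.enumerate s) _
    (fun res p => max res |p.2.2 - p.1|) (-1)
    (fun acc x _ => if_gt_eq_max acc _)]
  have hsorted : s.Pairwise Lt2 := mergeSortP_pairwise _ (pairs_pairwise_snd T)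
  have hmapeq : (PySem.List.enumerate s).map (fun p => |p.2.2 - p.1|) =
      s.map (fun r => |r.2 - rankIn s r|) := by
    apply List.ext_getElem
    · simp [PySem.List.length_enumerate]
    · intro k h1 h2
      simp only [List.getElem_map, PySem.List.getElem_enumerate]
      have hk : k < s.length := by simpa [PySem.List.length_enumerate] using h2
      rw [rankIn, countP_pos s hsorted k hk]
      simp only [zero_add]
  rw [← hmapeq, List.foldl_map]

-- B's nested loops, as a foldl max over the rank-based displacements of the unsorted pairs.
lemma b_as_foldl_max (T : List Int) :
    chaos_index_alt T =
      (((PySem.List.enumerate T).map (fun p => (p.2, p.1))).map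
        (fun r => |rankIn ((PySem.List.enumerate T).map (fun p => (p.2, p.1))) r - r.2|)).foldl
        max (-1) := by
  simp only [chaos_index_alt]
  have hbody : ∀ (best : Int), ∀ p ∈ PySem.List.enumerate T,
      (let rank : Int := (PySem.List.enumerate T).foldl
        (fun r q => if q.2 < p.2 ∨ (q.2 = p.2 ∧ q.1 < p.1) then r + 1 else r) 0
       if |rank - p.1| > best then |rank - p.1| else best) =
      max best |rankIn ((PySem.List.enumerate T).map (fun q => (q.2, q.1))) (p.2, p.1) - p.1| := by
    intro best p _
    have hcount : (PySem.List.enumerate T).foldl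
        (fun r q => if q.2 < p.2 ∨ (q.2 = p.2 ∧ q.1 < p.1) then r + 1 else r) (0 : Int) =
        rankIn ((PySem.List.enumerate T).map (fun q => (q.2, q.1))) (p.2, p.1) := by
      have hstep : (fun (r : Int) (q : Int × Int) =>
          if q.2 < p.2 ∨ (q.2 = p.2 ∧ q.1 < p.1) then r + 1 else r) =
          (fun r q => if (fun q : Int × Int =>
            lt2b (q.2, q.1) (p.2, p.1)) q = true then r + 1 else r) := by
        funext r q
        by_cases hc : q.2 < p.2 ∨ (q.2 = p.2 ∧ q.1 < p.1)
        · have hb : lt2b (q.2, q.1) (p.2, p.1) = true := by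
            rw [lt2b_eq_true_iff]; simpa [Lt2] using hc
          simp [hc, hb]
        · have hb : ¬ lt2b (q.2, q.1) (p.2, p.1) = true := by
            rw [lt2b_eq_true_iff]; simpa [Lt2] using hc
          simp [hc, hb]
      rw [hstep, PySem.List.foldl_count_if, rankIn, List.countP_map, zero_add]
      rfl
    simp only [hcount]
    exact if_gt_eq_max best _
  rw [PySem.List.foldl_congr_mem (PySem.List.enumerate T) _
    (fun best p => max best |rankIn ((PySem.List.enumerate T).map (fun q => (q.2, q.1))) (p.2, p.1) - p.1|)
    (-1) hbody]
  rw [List.map_map, List.foldl_map]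
  rfl

-- ===== VERDICT (by name: the statement is the Claim_ definition above) =====
theorem chaos_index_spec : Claim_equal_chaos_index := by
  unfold Claim_equal_chaos_index
  intro T _
  show chaos_index T = chaos_index_alt T
  rw [a_as_foldl_max, b_as_foldl_max]
  set ps := (PySem.List.enumerate T).map (fun p => (p.2, p.1)) with hps
  have hperm : (mergeSortP ps).Perm ps := mergeSortP_perm ps
  have hrank : ∀ r, rankIn (mergeSortP ps) r = rankIn ps r := by
    intro r
    simp [rankIn, hperm.countP_eq]
  have hmap : (mergeSortP ps).map (fun r => |r.2 - rankIn (mergeSortP ps) r|) =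
      (mergeSortP ps).map (fun r => |rankIn ps r - r.2|) := by
    apply List.map_congr_left
    intro r _
    rw [hrank r, abs_sub_comm]
  rw [hmap]
  exact List.Perm.foldl_op_eq (hperm.map _)
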